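-- pv_equiv track=rewrite | github.com/zer02dev/BimmerDaten | trc_coding.py | _apply_changes_to_content
-- ===== SOURCE A (Python) =====
-- from dataclasses import dataclass, field
--
-- @dataclass
-- class TrcSegment:
--     kind: str
--     option: str = ""
--     value: str = ""
--     raw_lines: list[str] = field(default_factory=list)
--     original_value: str = ""
--
-- def parse_trc_content(content: str) -> list[TrcSegment]:
--     lines = content.splitlines()
--     segments: list[TrcSegment] = []
--     index = 0
--
--     while index < len(lines):
--         current_line = lines[index]
--         if not current_line.strip():
--             segments.append(TrcSegment(kind="raw", raw_lines=[current_line]))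
--             index += 1
--             continue
--
--         if index + 1 < len(lines):
--             next_line = lines[index + 1]
--             if next_line.startswith(("\t", " ")):
--                 option = current_line.strip()
--                 value = next_line.strip()
--                 segments.append(
--                     TrcSegment(
--                         kind="option",
--                         option=option,
--                         value=value,
--                         raw_lines=[current_line, next_line],
--                         original_value=value,
--                     )
--                 )
--                 index += 2
--                 continue
--
--         segments.append(TrcSegment(kind="raw", raw_lines=[current_line]))
--         index += 1
--
--     return segments
--
-- def format_trc_content(segments: list[TrcSegment]) -> str:
--     lines: list[str] = []
--     for segment in segments:
--         if segment.kind == "option":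
--             lines.append(segment.option)
--             lines.append(f"\t\t{segment.value}")
--         else:
--             lines.extend(segment.raw_lines or [""])
--     if not lines:
--         return ""
--     return "\n".join(lines) + "\n"
--
-- def _apply_changes_to_content(base_content: str, changes: list[dict], value_key: str) -> str:
--     if not base_content.strip() or not changes:
--         return base_content
--
--     segments = parse_trc_content(base_content)
--     replacements: dict[str, str] = {}
--     for change in changes:
--         option = str(change.get("option") or "").strip().upper()
--         if not option:
--             continue
--         replacements[option] = str(change.get(value_key) or "")
--
--     for segment in segments:
--         if segment.kind != "option":
--             continue
--         replacement = replacements.get(segment.option.strip().upper())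
--         if replacement is not None:
--             segment.value = replacement
--
--     return format_trc_content(segments)
-- ===== SOURCE B (Python) =====
-- def _apply_changes_to_content(base_content: str, changes: list, value_key: str) -> str:
--     if not base_content.strip() or not changes:
--         return base_content
--
--     replacements = {}
--     for change in changes:
--         option = str(change.get("option") or "").strip().upper()
--         if option:
--             replacements[option] = str(change.get(value_key) or "")
--
--     lines = base_content.splitlines()
--     out = []
--     i = 0
--     while i < len(lines):
--         line = lines[i]
--         if line.strip() and i + 1 < len(lines) and lines[i + 1].startswith(("\t", " ")):
--             option = line.strip()
--             out.append(option)
--             out.append("\t\t" + replacements.get(option.upper(), lines[i + 1].strip()))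
--             i += 2
--         else:
--             out.append(line)
--             i += 1
--     return "\n".join(out) + "\n" if out else ""
-- ===== Notes on version B (the rewrite author's own statement) =====
-- stated objective: simpler
-- what changed: Replaces the parse-to-TrcSegment-list / mutate / reformat pipeline with one indexed pass over splitlines() that emits output lines directly, dropping the dataclass and two of the three traversals.
import Mathlib
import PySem

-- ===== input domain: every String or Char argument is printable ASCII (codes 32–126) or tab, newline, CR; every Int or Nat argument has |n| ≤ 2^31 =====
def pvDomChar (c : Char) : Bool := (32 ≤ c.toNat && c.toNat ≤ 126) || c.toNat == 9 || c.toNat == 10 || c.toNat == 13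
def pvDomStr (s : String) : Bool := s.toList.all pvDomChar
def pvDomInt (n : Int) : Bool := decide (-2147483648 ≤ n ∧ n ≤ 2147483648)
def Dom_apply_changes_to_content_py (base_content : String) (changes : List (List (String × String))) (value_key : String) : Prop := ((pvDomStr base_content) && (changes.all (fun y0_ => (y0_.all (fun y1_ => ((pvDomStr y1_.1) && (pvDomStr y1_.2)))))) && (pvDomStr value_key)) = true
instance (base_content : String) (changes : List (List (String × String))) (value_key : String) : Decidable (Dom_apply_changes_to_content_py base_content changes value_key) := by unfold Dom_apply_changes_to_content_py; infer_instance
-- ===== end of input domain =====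

-- B replaces A's parse-to-segment-list / mutate / reformat pipeline with one indexed pass over
-- splitlines() that emits output lines directly (objective: simpler).

-- ===== PORT A =====
structure PvSeg where
  kind : String
  option : String
  value : String
  raw_lines : List String
  original_value : String
deriving DecidableEq, Repr

-- parse_trc_content: while-loop over lines with index → structural recursion on the line list
def pvParse (lines : List String) : List PvSeg :=
  match lines with
  | [] => []
  | l :: rest =>
    if PySem.Str.strip l == "" then
      ⟨"raw", "", "", [l], ""⟩ :: pvParse rest
    else
      match rest with
      | next :: rest2 =>
        if PySem.Str.startswith next "\t" || PySem.Str.startswith next " " then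
          ⟨"option", PySem.Str.strip l, PySem.Str.strip next, [l, next], PySem.Str.strip next⟩ :: pvParse rest2
        else
          ⟨"raw", "", "", [l], ""⟩ :: pvParse (next :: rest2)
      | [] => [⟨"raw", "", "", [l], ""⟩]
termination_by lines.length
decreasing_by all_goals simp

-- format_trc_content: for-loop appending lines → foldl over the segments
def pvFormat (segments : List PvSeg) : String :=
  let lines : List String := segments.foldl (fun acc seg =>
    if seg.kind == "option" then
      acc ++ [seg.option, "\t\t" ++ seg.value]
    else
      acc ++ (if seg.raw_lines == [] then [""] else seg.raw_lines)) []
  if lines == [] then "" else PySem.Str.join "\n" lines ++ "\n"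

-- the replacements-dict building loop (identical in A and in B's python, so shared here);
-- 'str(change.get(k) or "")' on string values is exactly getD with default "" ('or' only maps None/"" to "")
def pvReplacements (changes : List (List (String × String))) (value_key : String) : PySem.Dict String String :=
  changes.foldl (fun repl change =>
    let d : PySem.Dict String String := PySem.Dict.mk change
    let option := PySem.Str.upper (PySem.Str.strip (PySem.Dict.getD d "option" ""))
    if option == "" then repl
    else PySem.Dict.insert repl option (PySem.Dict.getD d value_key "")) PySem.Dict.empty

def apply_changes_to_content_py (base_content : String) (changes : List (List (String × String))) (value_key : String) : String :=
  if PySem.Str.strip base_content == "" || changes.isEmpty then base_content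
  else
    let segments := pvParse (PySem.Str.splitlines base_content)
    let replacements := pvReplacements changes value_key
    -- the mutating for-loop over segments → map
    let segments2 := segments.map (fun seg =>
      if seg.kind != "option" then seg
      else
        match PySem.Dict.get? replacements (PySem.Str.upper (PySem.Str.strip seg.option)) with
        | some r => { seg with value := r }
        | none => seg)
    pvFormat segments2

-- ===== PORT B =====
-- Source B's single while-loop over the lines, emitting output lines directly
def pvGo (repl : PySem.Dict String String) (lines : List String) : List String :=
  match lines with
  | [] => []
  | l :: rest =>
    match rest with
    | next :: rest2 =>
      if PySem.Str.strip l != "" && (PySem.Str.startswith next "\t" || PySem.Str.startswith next " ") then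
        let opt := PySem.Str.strip l
        opt :: ("\t\t" ++ PySem.Dict.getD repl (PySem.Str.upper opt) (PySem.Str.strip next)) :: pvGo repl rest2
      else l :: pvGo repl (next :: rest2)
    | [] => [l]
termination_by lines.length
decreasing_by all_goals simp

def apply_changes_to_content_py_alt (base_content : String) (changes : List (List (String × String))) (value_key : String) : String :=
  if PySem.Str.strip base_content == "" || changes.isEmpty then base_content
  else
    let repl := pvReplacements changes value_key
    let out := pvGo repl (PySem.Str.splitlines base_content)
    if out == [] then "" else PySem.Str.join "\n" out ++ "\n"

-- ===== PRECONDITION & SPEC =====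
def Spec_apply_changes_to_content_py (base_content : String) (changes : List (List (String × String))) (value_key : String) (out : String) : Prop := out = apply_changes_to_content_py_alt base_content changes value_key
instance (base_content : String) (changes : List (List (String × String))) (value_key : String) (out : String) : Decidable (Spec_apply_changes_to_content_py base_content changes value_key out) := by unfold Spec_apply_changes_to_content_py; infer_instance

-- ===== CLAIM (what is proved, stated in full; the proofs are below) =====
def Claim_equal_apply_changes_to_content_py : Prop := ∀ (base_content : String) (changes : List (List (String × String))) (value_key : String), Dom_apply_changes_to_content_py base_content changes value_key → Spec_apply_changes_to_content_py base_content changes value_key (apply_changes_to_content_py base_content changes value_key)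

-- ===== LEMMAS AND PROOFS =====
theorem pv_dw_idem (p : Char → Bool) (l : List Char) :
    List.dropWhile p (List.dropWhile p l) = List.dropWhile p l := by
  induction l with
  | nil => rfl
  | cons a l ih => by_cases h : p a <;> simp [h, ih]

theorem pv_dw_append_singleton (p : Char → Bool) (xs : List Char) (c : Char) (hc : p c = false) :
    List.dropWhile p (xs ++ [c]) = List.dropWhile p xs ++ [c] := by
  induction xs with
  | nil => simp [List.dropWhile, hc]
  | cons a xs ih => by_cases h : p a <;> simp [h, ih]

theorem pv_rstrip_idem (s : List Char) :
    PySem.Chars.rstrip (PySem.Chars.rstrip s) = PySem.Chars.rstrip s := by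
  simp [PySem.Chars.rstrip, pv_dw_idem]

theorem pv_lstrip_rstrip_lstrip (s : List Char) :
    PySem.Chars.lstrip (PySem.Chars.rstrip (PySem.Chars.lstrip s)) = PySem.Chars.rstrip (PySem.Chars.lstrip s) := by
  cases hu : PySem.Chars.lstrip s with
  | nil => simp [PySem.Chars.rstrip, PySem.Chars.lstrip]
  | cons c u =>
    have hc : PySem.Chars.isspace c = false := by
      by_contra hcc
      have h2 := pv_dw_idem PySem.Chars.isspace s
      rw [show List.dropWhile PySem.Chars.isspace s = PySem.Chars.lstrip s from rfl, hu] at h2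
      simp only [List.dropWhile_cons, eq_true_of_ne_false hcc, if_true] at h2
      have := List.length_dropWhile_le PySem.Chars.isspace u
      rw [h2] at this
      simp at this
    have : PySem.Chars.rstrip (c :: u)
        = c :: (List.dropWhile PySem.Chars.isspace u.reverse).reverse := by
      simp [PySem.Chars.rstrip, pv_dw_append_singleton _ _ _ hc]
    rw [this]
    simp [PySem.Chars.lstrip, hc]

theorem pv_strip_idem (s : List Char) :
    PySem.Chars.strip (PySem.Chars.strip s) = PySem.Chars.strip s := by
  show PySem.Chars.rstrip (PySem.Chars.lstrip (PySem.Chars.rstrip (PySem.Chars.lstrip s)))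
      = PySem.Chars.rstrip (PySem.Chars.lstrip s)
  rw [pv_lstrip_rstrip_lstrip, pv_rstrip_idem]

theorem pv_str_strip_idem (s : String) :
    PySem.Str.strip (PySem.Str.strip s) = PySem.Str.strip s := by
  simp [PySem.Str.strip, pv_strip_idem]

-- the per-segment output lines of A's format loop
def pvSegLines (seg : PvSeg) : List String :=
  if seg.kind == "option" then [seg.option, "\t\t" ++ seg.value]
  else if seg.raw_lines == [] then [""] else seg.raw_lines

theorem pv_foldl_lines (segs : List PvSeg) (init : List String) :
    segs.foldl (fun acc seg =>
      if seg.kind == "option" then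
        acc ++ [seg.option, "\t\t" ++ seg.value]
      else
        acc ++ (if seg.raw_lines == [] then [""] else seg.raw_lines)) init
    = init ++ segs.flatMap pvSegLines := by
  induction segs generalizing init with
  | nil => simp
  | cons s ss ih =>
    have hstep : (fun (acc : List String) (seg : PvSeg) =>
        if seg.kind == "option" then acc ++ [seg.option, "\t\t" ++ seg.value]
        else acc ++ (if seg.raw_lines == [] then [""] else seg.raw_lines))
        = fun acc seg => acc ++ pvSegLines seg := by
      funext acc seg
      by_cases h : seg.kind == "option" <;> simp [pvSegLines, h]
    rw [hstep] at ih ⊢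
    simp only [List.foldl_cons, List.flatMap_cons, ih, List.append_assoc]

theorem pv_main (repl : PySem.Dict String String) (ls : List String) :
    ((pvParse ls).map (fun seg =>
      if seg.kind != "option" then seg
      else
        match PySem.Dict.get? repl (PySem.Str.upper (PySem.Str.strip seg.option)) with
        | some r => { seg with value := r }
        | none => seg)).flatMap pvSegLines = pvGo repl ls := by
  induction ls using pvParse.induct with
  | case1 => simp [pvParse, pvGo]
  | case2 l rest hblank ih =>
    have hb : PySem.Str.strip l = "" := by simpa using hblank
    cases rest with
    | nil => simp [pvParse, pvGo, pvSegLines, hb]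
    | cons next rest2 =>
      simp [pvParse, pvGo, pvSegLines, hb] at ih ⊢
      exact ih
  | case3 l hblank next rest2 hstart ih =>
    have hb : (PySem.Str.strip l == "") = false := by simpa using hblank
    have hbn : PySem.Str.strip l ≠ "" := by simpa using hblank
    have hs : PySem.Chars.startswith next.toList ['\t'] = true ∨ PySem.Chars.startswith next.toList [' '] = true := by
      simpa using hstart
    cases hj : PySem.Dict.get? repl (PySem.Str.upper (PySem.Str.strip l)) with
    | some r =>
      simp [pvParse, pvGo, hb, hbn, hs, pvSegLines, pv_str_strip_idem, hj,
        PySem.Dict.getD_eq_get?_getD]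
      simpa using ih
    | none =>
      simp [pvParse, pvGo, hb, hbn, hs, pvSegLines, pv_str_strip_idem, hj,
        PySem.Dict.getD_eq_get?_getD]
      simpa using ih
  | case4 l hblank next rest2 hstart ih =>
    have hb : (PySem.Str.strip l == "") = false := by simpa using hblank
    have hs : ¬(PySem.Chars.startswith next.toList ['\t'] = true ∨ PySem.Chars.startswith next.toList [' '] = true) := by
      simpa using hstart
    simp [pvParse, pvGo, pvSegLines, hb, hs] at ih ⊢
    exact ih
  | case5 l hblank =>
    have hb : (PySem.Str.strip l == "") = false := by simpa using hblank
    simp [pvParse, pvGo, pvSegLines, hb]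

-- ===== VERDICT (by name: the statement is the Claim_ definition above) =====
theorem apply_changes_to_content_py_spec : Claim_equal_apply_changes_to_content_py := by
  intro base changes vk _
  show apply_changes_to_content_py base changes vk = apply_changes_to_content_py_alt base changes vk
  unfold apply_changes_to_content_py apply_changes_to_content_py_alt pvFormat
  cases hg : (PySem.Str.strip base == "" || changes.isEmpty) with
  | true => simp
  | false =>
    simp only [Bool.false_eq_true, if_false]
    rw [pv_foldl_lines, pv_main]
    simp
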